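-- pv_equiv track=rewrite | github.com/CUAGAIN-95/python_study | 프로그래머스/1/17681. ［1차］ 비밀지도/［1차］ 비밀지도.py | solution
-- ===== SOURCE A (Python) =====
-- def d_to_b(num, n):
--     result = []
--     i = num
--     while True:
--         i = num // 2
--         s = num % 2
--         result.append(s)
--         num = i
--         if i == 0:
--             break
--     for _ in range(n - len(result)):
--         result.append(0)
--     result.reverse()
--     return result
--
-- def to_hash(arr):
--     s = ''
--     for i in arr:
--         if i == 1:
--             s += '#'
--         else:
--             s += ' '
--
--     return s
--
-- def solution(n, arr1, arr2):
--     answer = []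
--     for a, b in zip(arr1, arr2):
--         answer.append(a | b)
--
--     for i in range(len(answer)):
--         answer[i] = d_to_b(answer[i], n)
--         answer[i] = to_hash(answer[i])
--     return answer
-- ===== SOURCE B (Python) =====
-- def solution(n, arr1, arr2):
--     table = {ord('0'): ' ', ord('1'): '#'}
--     return [format(a | b, 'b').zfill(n).translate(table) for a, b in zip(arr1, arr2)]
-- ===== Notes on version B (the rewrite author's own statement) =====
-- stated objective: simpler
-- what changed: Replaces A's hand-rolled do-while division loop, explicit zero-padding loop, list reverse and per-digit '#'/' ' accumulation with a single format(v,'b').zfill(n).translate(table) expression per zipped pair; Pre_ excludes inputs with a negative entry in some zipped pair, on which A's 'while True' loop never terminates.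
import Mathlib
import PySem

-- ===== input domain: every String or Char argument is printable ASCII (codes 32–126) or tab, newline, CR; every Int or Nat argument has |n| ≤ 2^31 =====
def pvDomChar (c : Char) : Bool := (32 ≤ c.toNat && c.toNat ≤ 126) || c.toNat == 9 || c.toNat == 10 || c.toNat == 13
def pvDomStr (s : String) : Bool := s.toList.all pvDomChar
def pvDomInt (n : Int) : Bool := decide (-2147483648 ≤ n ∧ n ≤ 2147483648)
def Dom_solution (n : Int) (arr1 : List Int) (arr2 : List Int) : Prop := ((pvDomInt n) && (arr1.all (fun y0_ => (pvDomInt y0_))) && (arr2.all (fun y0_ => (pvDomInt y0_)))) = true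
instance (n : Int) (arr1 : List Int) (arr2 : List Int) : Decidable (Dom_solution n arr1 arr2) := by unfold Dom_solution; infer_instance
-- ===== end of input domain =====

-- B replaces A's hand-rolled division/padding/reverse binary conversion and per-digit loop with
-- one format(v,'b').zfill(n).translate(...) per row (objective: simpler; same asymptotic cost).

-- ===== PORT A =====
-- 'while True: i = num // 2; s = num % 2; result.append(s); num = i; if i == 0: break'
-- fuel-based transcription of A's do-while loop (fuel num.toNat + 1 suffices for num ≥ 0;
-- for num < 0 the Python loop never terminates — those inputs are excluded by Pre_solution)
def dLoopA : Nat → Int → List Int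
  | 0, _ => []
  | fuel + 1, num =>
    let i := PySem.Int.floordiv num 2
    let s := PySem.Int.mod num 2
    if i = 0 then [s] else s :: dLoopA fuel i

def d_to_b (num : Int) (n : Int) : List Int :=
  let result := dLoopA (num.toNat + 1) num
  -- 'for _ in range(n - len(result)): result.append(0)'
  let result := (PySem.List.pyRange 0 (n - result.length) 1).foldl (fun acc _ => acc ++ [(0 : Int)]) result
  result.reverse

-- strings handled as their char lists (PySem convention); 's += …' is the list append
def to_hash (arr : List Int) : String :=
  String.ofList (arr.foldl (fun s i => s ++ (if i = 1 then ['#'] else [' '])) [])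

def solution (n : Int) (arr1 : List Int) (arr2 : List Int) : List String :=
  let answer := (arr1.zip arr2).foldl (fun acc p => acc ++ [PySem.Int.bor p.1 p.2]) []
  -- 'for i in range(len(answer)): answer[i] = to_hash(d_to_b(answer[i], n))' — elementwise update
  answer.map (fun v => to_hash (d_to_b v n))

-- ===== PORT B =====
-- str.translate({48: ' ', 49: '#'}): hand port (not in PySem) — maps '0'/'1', leaves other chars
def trB (c : Char) : Char := if c = '1' then '#' else if c = '0' then ' ' else c

def solution_alt (n : Int) (arr1 : List Int) (arr2 : List Int) : List String :=
  (arr1.zip arr2).map (fun p =>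
    String.ofList (((PySem.Str.zfill (PySem.Int.toBin (PySem.Int.bor p.1 p.2)) n).toList).map trB))

-- ===== PRECONDITION & SPEC =====
-- Pre_ excludes inputs where some zipped pair has a negative entry: there a | b < 0 and A's
-- 'while True' loop never reaches i == 0, so A does not return (it diverges).
def Pre_solution (n : Int) (arr1 : List Int) (arr2 : List Int) : Prop :=
  ∀ p ∈ arr1.zip arr2, 0 ≤ p.1 ∧ 0 ≤ p.2
instance (n : Int) (arr1 : List Int) (arr2 : List Int) : Decidable (Pre_solution n arr1 arr2) := by
  unfold Pre_solution; infer_instance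
def pvWitness_solution : Int × List Int × List Int := (5, [9, 20, 28, 18, 11], [30, 1, 21, 17, 28])

def Spec_solution (n : Int) (arr1 : List Int) (arr2 : List Int) (out : List String) : Prop := out = solution_alt n arr1 arr2
instance (n : Int) (arr1 : List Int) (arr2 : List Int) (out : List String) : Decidable (Spec_solution n arr1 arr2 out) := by unfold Spec_solution; infer_instance

-- ===== CLAIM (what is proved, stated in full; the proofs are below) =====
def Claim_equal_solution : Prop := ∀ (n : Int) (arr1 : List Int) (arr2 : List Int), Dom_solution n arr1 arr2 → Pre_solution n arr1 arr2 → Spec_solution n arr1 arr2 (solution n arr1 arr2)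

-- ===== LEMMAS AND PROOFS =====

lemma dLoopA_zero (num : Int) : dLoopA 0 num = [] := rfl

lemma dLoopA_succ (f : Nat) (num : Int) :
    dLoopA (f + 1) num = if PySem.Int.floordiv num 2 = 0 then [PySem.Int.mod num 2]
      else PySem.Int.mod num 2 :: dLoopA f (PySem.Int.floordiv num 2) := rfl

lemma toDigitsCore_zero (n : Nat) (ds : List Char) : Nat.toDigitsCore 2 0 n ds = ds := rfl

lemma toDigitsCore_succ (f n : Nat) (ds : List Char) :
    Nat.toDigitsCore 2 (f + 1) n ds = if n / 2 = 0 then (n % 2).digitChar :: ds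
      else Nat.toDigitsCore 2 f (n / 2) ((n % 2).digitChar :: ds) := rfl

lemma digit_char_eq (m : Nat) :
    (if ((m : Int) % 2) = 1 then '1' else '0') = Nat.digitChar (m % 2) := by
  have hc : ((m : Int) % 2) = ((m % 2 : Nat) : Int) := by omega
  rcases Nat.mod_two_eq_zero_or_one m with h | h <;> simp [hc, h, Nat.digitChar]

-- A's digit loop, reversed and rendered as chars, is Nat.toDigitsCore with the same fuel discipline
lemma dLoopA_toDigitsCore (fuel : Nat) : ∀ (m : Nat) (ds : List Char),
    ((dLoopA (fuel + 1) (m : Int)).reverse.map (fun i : Int => if i = 1 then '1' else '0')) ++ ds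
      = Nat.toDigitsCore 2 (fuel + 1) m ds := by
  induction fuel with
  | zero =>
    intro m ds
    rw [dLoopA_succ, toDigitsCore_succ,
      (by exact_mod_cast PySem.Int.floordiv_natCast m 2 :
        PySem.Int.floordiv (m : Int) 2 = ((m / 2 : Nat) : Int)),
      (by exact_mod_cast PySem.Int.mod_natCast m 2 :
        PySem.Int.mod (m : Int) 2 = ((m % 2 : Nat) : Int))]
    by_cases h : m / 2 = 0
    · simp [h, digit_char_eq m]
    · have hne : ((m / 2 : Nat) : Int) ≠ 0 := by exact_mod_cast h
      simp [hne, dLoopA_zero, toDigitsCore_zero, digit_char_eq m]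
  | succ f ih =>
    intro m ds
    rw [dLoopA_succ, toDigitsCore_succ,
      (by exact_mod_cast PySem.Int.floordiv_natCast m 2 :
        PySem.Int.floordiv (m : Int) 2 = ((m / 2 : Nat) : Int)),
      (by exact_mod_cast PySem.Int.mod_natCast m 2 :
        PySem.Int.mod (m : Int) 2 = ((m % 2 : Nat) : Int))]
    by_cases h : m / 2 = 0
    · simp [h, digit_char_eq m]
    · have hne : ((m / 2 : Nat) : Int) ≠ 0 := by exact_mod_cast h
      rw [if_neg hne, if_neg h, List.reverse_cons, List.map_append, List.append_assoc,
        ← ih (m / 2) ((Nat.digitChar (m % 2)) :: ds)]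
      simp [digit_char_eq m]

lemma dLoopA_ne_nil (fuel : Nat) (num : Int) : dLoopA (fuel + 1) num ≠ [] := by
  rw [dLoopA_succ]; split <;> simp

lemma length_pyRange01 (k : Int) : (PySem.List.pyRange 0 k 1).length = k.toNat := by
  simp only [PySem.List.pyRange]
  split
  · omega
  · split
    · simp; omega
    · simp; omega

lemma to_hash_chars (arr : List Int) :
    to_hash arr = String.ofList (arr.map (fun i : Int => if i = 1 then '#' else ' ')) := by
  unfold to_hash
  congr 1
  rw [PySem.List.foldl_append_eq_flatMap, List.nil_append]
  rw [show (fun i : Int => if i = 1 then ['#'] else [' '])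
        = (fun i : Int => [if i = 1 then '#' else ' ']) from by funext i; split <;> rfl]
  exact List.map_eq_flatMap.symm

lemma trB_bit (i : Int) : trB (if i = 1 then '1' else '0') = (if i = 1 then '#' else ' ') := by
  unfold trB; split <;> simp

-- binary digits of a nonneg value: A's reversed loop output rendered as chars = toBinChars
lemma rev_chars (m : Nat) :
    ((dLoopA (m + 1) (m : Int)).reverse.map (fun i : Int => if i = 1 then '1' else '0'))
      = PySem.Int.toBinChars (m : Int) := by
  have := dLoopA_toDigitsCore m m []
  simpa [PySem.Int.toBinChars, Nat.toDigits] using this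

-- elementwise: A's row equals B's row for a nonnegative value
lemma row_eq (v : Int) (hv : 0 ≤ v) (n : Int) :
    to_hash (d_to_b v n)
      = String.ofList (((PySem.Str.zfill (PySem.Int.toBin v) n).toList).map trB) := by
  obtain ⟨m, rfl⟩ : ∃ m : Nat, v = (m : Int) := ⟨v.toNat, (Int.toNat_of_nonneg hv).symm⟩
  have htn : ((m : Int)).toNat = m := Int.toNat_natCast m
  set L := dLoopA (m + 1) (m : Int) with hL
  have hrev : L.reverse.map (fun i : Int => if i = 1 then '1' else '0')
      = PySem.Int.toBinChars (m : Int) := rev_chars m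
  have hcslen : (PySem.Int.toBinChars (m : Int)).length = L.length := by
    rw [← hrev]; simp
  have hpad : (PySem.List.pyRange 0 (n - L.length) 1).foldl (fun acc _ => acc ++ [(0 : Int)]) L
      = L ++ List.replicate (n - L.length).toNat (0 : Int) := by
    rw [PySem.List.foldl_append_singleton_eq_map]
    congr 1
    rw [List.map_const', length_pyRange01]
  have hdtob : d_to_b (m : Int) n
      = List.replicate (n - L.length).toNat (0 : Int) ++ L.reverse := by
    simp only [d_to_b, htn, ← hL]
    rw [hpad, List.reverse_append, List.reverse_replicate]
  rw [hdtob, to_hash_chars]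
  congr 1
  rw [PySem.Str.zfill, String.toList_ofList, PySem.Int.toList_toBin]
  rw [List.map_append, List.map_replicate]
  by_cases hn : n ≤ ((PySem.Int.toBinChars (m : Int)).length : Int)
  · have hz : PySem.Chars.zfill (PySem.Int.toBinChars (m : Int)) n
        = PySem.Int.toBinChars (m : Int) := by
      unfold PySem.Chars.zfill; rw [if_pos hn]
    rw [hz, ← hrev, List.map_map]
    have h0 : (n - (L.length : Int)).toNat = 0 := by omega
    rw [h0, List.replicate_zero, List.nil_append]
    exact List.map_congr_left (fun i _ => (trB_bit i).symm)
  · obtain ⟨c, rest, hcons⟩ : ∃ c rest, PySem.Int.toBinChars (m : Int) = c :: rest := by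
      rcases h : PySem.Int.toBinChars (m : Int) with _ | ⟨c, rest⟩
      · exfalso
        rw [← hrev] at h
        have hnn := dLoopA_ne_nil m (m : Int)
        simp at h
        exact hnn (hL ▸ h)
      · exact ⟨c, rest, rfl⟩
    have hc01 : c = '0' ∨ c = '1' := by
      have : c ∈ PySem.Int.toBinChars (m : Int) := by rw [hcons]; exact List.mem_cons_self
      rw [← hrev] at this
      obtain ⟨i, _, hi⟩ := List.mem_map.mp this
      by_cases h1 : i = 1
      · right; rw [← hi]; simp [h1]
      · left; rw [← hi]; simp [h1]
    have hz : PySem.Chars.zfill (PySem.Int.toBinChars (m : Int)) n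
        = List.replicate (n.toNat - (PySem.Int.toBinChars (m : Int)).length) '0'
            ++ PySem.Int.toBinChars (m : Int) := by
      unfold PySem.Chars.zfill
      rw [if_neg hn, hcons]
      have hpm : ¬ (c = '+' ∨ c = '-') := by rcases hc01 with h | h <;> simp [h]
      simp only []
      rw [if_neg hpm]
    rw [hz, List.map_append, List.map_replicate, ← hrev, List.map_map]
    have hlen : (n - (L.length : Int)).toNat
        = n.toNat - (PySem.Int.toBinChars (m : Int)).length := by
      rw [hcslen]; omega
    rw [hlen]
    congr 1
    · rw [hcslen]; simp [trB]
    · exact List.map_congr_left (fun i _ => (trB_bit i).symm)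

-- ===== VERDICT (by name: the statement is the Claim_ definition above) =====
theorem solution_spec : Claim_equal_solution := by
  intro n arr1 arr2 _ hpre
  unfold Spec_solution solution solution_alt
  rw [PySem.List.foldl_append_singleton_eq_map, List.nil_append, List.map_map]
  refine List.map_congr_left ?_
  intro p hp
  obtain ⟨h1, h2⟩ := hpre p hp
  exact row_eq _ (by
    have := PySem.Int.bor_of_nonneg h1 h2
    simp [this]) n
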